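-- pv_equiv track=rewrite | github.com/freelabz/secator | secator/query/utils.py | _normalize_logical_ops
-- ===== SOURCE A (Python) =====
-- def _normalize_logical_ops(query):
--     """Replace Python-style 'and'/'or' with '&&'/'||', skipping quoted substrings."""
--     result = []
--     i = 0
--     in_quote = None
--     while i < len(query):
--         ch = query[i]
--         if in_quote is None and ch in ('"', "'"):
--             in_quote = ch
--             result.append(ch)
--             i += 1
--         elif ch == in_quote:
--             in_quote = None
--             result.append(ch)
--             i += 1
--         elif in_quote is None:
--             if query[i:i + 5] == ' and ':
--                 result.append(' && ')
--                 i += 5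
--             elif query[i:i + 4] == ' or ':
--                 result.append(' || ')
--                 i += 4
--             else:
--                 result.append(ch)
--                 i += 1
--         else:
--             result.append(ch)
--             i += 1
--     return ''.join(result)
-- ===== SOURCE B (Python) =====
-- def _rewrite_ops(text):
--     """One left-to-right pass replacing ' and '/' or ' (and tried first) in plain text."""
--     out = []
--     i = 0
--     while i < len(text):
--         if text.startswith(' and ', i):
--             out.append(' && ')
--             i += 5
--         elif text.startswith(' or ', i):
--             out.append(' || ')
--             i += 4
--         else:
--             out.append(text[i])
--             i += 1
--     return ''.join(out)
--
--
-- def _normalize_logical_ops(query):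
--     """Replace Python-style 'and'/'or' with '&&'/'||', skipping quoted substrings."""
--     # phase 1: split the query into alternating unquoted / quoted segments
--     segments = []  # list of (quoted, text)
--     rest = query
--     while True:
--         k = next((i for i, c in enumerate(rest) if c in '"\''), None)
--         if k is None:
--             segments.append((False, rest))
--             break
--         q = rest[k]
--         j = rest.find(q, k + 1)
--         segments.append((False, rest[:k]))
--         if j == -1:
--             segments.append((True, rest[k:]))
--             break
--         segments.append((True, rest[k:j + 1]))
--         rest = rest[j + 1:]
--     # phase 2: rewrite operators in the unquoted segments only, keep quoted ones verbatim
--     return ''.join(text if quoted else _rewrite_ops(text) for quoted, text in segments)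
-- ===== Notes on version B (the rewrite author's own statement) =====
-- stated objective: alternative
-- what changed: Replaces A's single per-character quote-state machine by two staged passes: first split the query into alternating unquoted/quoted segments, then rewrite ' and '/' or ' inside the unquoted segments only and join.
import Mathlib
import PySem

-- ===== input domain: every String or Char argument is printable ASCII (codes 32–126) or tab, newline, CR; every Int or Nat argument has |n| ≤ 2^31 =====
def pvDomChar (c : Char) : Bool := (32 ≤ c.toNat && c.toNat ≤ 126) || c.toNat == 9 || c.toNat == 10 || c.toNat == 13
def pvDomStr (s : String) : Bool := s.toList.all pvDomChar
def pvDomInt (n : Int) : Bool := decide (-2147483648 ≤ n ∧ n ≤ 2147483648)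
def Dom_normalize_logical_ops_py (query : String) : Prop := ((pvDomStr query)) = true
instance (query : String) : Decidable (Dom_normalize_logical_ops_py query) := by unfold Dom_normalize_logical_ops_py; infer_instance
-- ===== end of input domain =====

-- B decomposes the job into two staged passes — split the query into alternating
-- unquoted/quoted segments, then rewrite operators inside unquoted segments only —
-- instead of A's single per-character quote-state machine (objective: alternative).

-- ===== PORT A =====
-- A's while loop: index i becomes the remaining suffix `rest` (= query[i:]), the
-- `in_quote` variable is carried as `inq : Option Char`; branches in A's order.
def pvLoopA (rest : List Char) (inq : Option Char) : List Char :=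
  match rest with
  | [] => []
  | ch :: tl =>
    if inq = none ∧ (ch = '"' ∨ ch = '\'') then
      ch :: pvLoopA tl (some ch)
    else if some ch = inq then
      ch :: pvLoopA tl none
    else if inq = none then
      if (ch :: tl).take 5 = [' ', 'a', 'n', 'd', ' '] then
        [' ', '&', '&', ' '] ++ pvLoopA ((ch :: tl).drop 5) none
      else if (ch :: tl).take 4 = [' ', 'o', 'r', ' '] then
        [' ', '|', '|', ' '] ++ pvLoopA ((ch :: tl).drop 4) none
      else
        ch :: pvLoopA tl none
    else
      ch :: pvLoopA tl inq
termination_by rest.length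
decreasing_by all_goals (simp; try omega)

def normalize_logical_ops_py (query : String) : String :=
  String.ofList (pvLoopA query.toList none)

-- ===== PORT B =====
-- phase-2 helper `_rewrite_ops`: one pass over plain (quote-free) text
def pvRewriteOps (text : List Char) : List Char :=
  match text with
  | [] => []
  | c :: tl =>
    if (c :: tl).take 5 = [' ', 'a', 'n', 'd', ' '] then
      [' ', '&', '&', ' '] ++ pvRewriteOps ((c :: tl).drop 5)
    else if (c :: tl).take 4 = [' ', 'o', 'r', ' '] then
      [' ', '|', '|', ' '] ++ pvRewriteOps ((c :: tl).drop 4)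
    else
      c :: pvRewriteOps tl
termination_by text.length
decreasing_by all_goals (simp; try omega)

-- phase-1 segmenter: the `enumerate`/`find` scans become takeWhile/dropWhile on the
-- remaining suffix; each step emits an unquoted piece and (if present) a quoted span.
def pvSegs (rest : List Char) : List (Bool × List Char) :=
  match h : rest.dropWhile (fun c => !(c == '"' || c == '\'')) with
  | [] => [(false, rest.takeWhile (fun c => !(c == '"' || c == '\'')))]
  | q :: tl =>
    match h2 : tl.dropWhile (fun x => x != q) with
    | [] => [(false, rest.takeWhile (fun c => !(c == '"' || c == '\''))), (true, q :: tl)]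
    | c :: r =>
      (false, rest.takeWhile (fun c => !(c == '"' || c == '\''))) ::
      (true, q :: (tl.takeWhile (fun x => x != q) ++ [c])) :: pvSegs r
termination_by rest.length
decreasing_by
  have e1 := List.length_dropWhile_le (fun c => !(c == '"' || c == '\'')) rest
  rw [h] at e1
  have e2 := List.length_dropWhile_le (fun x => x != q) tl
  rw [h2] at e2
  simp at e1 e2; omega

def normalize_logical_ops_py_alt (query : String) : String :=
  String.ofList ((pvSegs query.toList).flatMap (fun s => if s.1 then s.2 else pvRewriteOps s.2))

-- ===== PRECONDITION & SPEC =====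
def Spec_normalize_logical_ops_py (query : String) (out : String) : Prop := out = normalize_logical_ops_py_alt query
instance (query : String) (out : String) : Decidable (Spec_normalize_logical_ops_py query out) := by unfold Spec_normalize_logical_ops_py; infer_instance

-- ===== CLAIM (what is proved, stated in full; the proofs are below) =====
def Claim_equal_normalize_logical_ops_py : Prop := ∀ (query : String), Dom_normalize_logical_ops_py query → Spec_normalize_logical_ops_py query (normalize_logical_ops_py query)

-- ===== LEMMAS AND PROOFS =====

-- A quote-free prefix followed by nothing or a quote: A's scan on the prefix is exactly
-- pvRewriteOps (an operator match cannot reach across into the leading quote char).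
lemma take_pat_append (u d pat : List Char)
    (hd : ∀ q tl, d = q :: tl → (q = '"' ∨ q = '\''))
    (hpat : ∀ c ∈ pat, ¬(c = '"' ∨ c = '\'')) :
    (u ++ d).take pat.length = pat ↔ u.take pat.length = pat := by
  by_cases hle : pat.length ≤ u.length
  · rw [List.take_append_of_le_length hle]
  · rw [not_le] at hle
    constructor
    · intro h
      exfalso
      have hlen : ((u ++ d).take pat.length).length = pat.length := by rw [h]
      have hdd : d ≠ [] := by
        rintro rfl
        simp at hlen
        omega
      obtain ⟨q, tl, rfl⟩ := List.exists_cons_of_ne_nil hdd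
      have hql : u.length < (u ++ q :: tl).length := by simp
      have hub : u.length < pat.length := hle
      have hlen2 : pat.length ≤ (u ++ q :: tl).length := by
        simp only [List.length_take] at hlen
        omega
      have hmem : q ∈ (u ++ q :: tl).take pat.length := by
        rw [List.take_append, List.take_of_length_le (le_of_lt hle)]
        refine List.mem_append.mpr (Or.inr ?_)
        have hk : pat.length - u.length = (pat.length - u.length - 1) + 1 := by omega
        rw [hk, List.take_succ_cons]
        simp
      rw [h] at hmem
      exact hpat q hmem (hd q tl rfl)
    · intro h
      exfalso
      have := congrArg List.length h
      simp at this
      omega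

lemma pvLoopA_noquote : ∀ (n : ℕ) (u d : List Char), u.length ≤ n →
    (∀ c ∈ u, ¬(c = '"' ∨ c = '\'')) →
    (∀ q tl, d = q :: tl → (q = '"' ∨ q = '\'')) →
    pvLoopA (u ++ d) none = pvRewriteOps u ++ pvLoopA d none := by
  intro n
  induction n with
  | zero =>
    intro u d h _ _
    have : u = [] := by cases u <;> simp_all
    subst this
    simp [pvRewriteOps]
  | succ m ih =>
    intro u d hlen hu hd
    match u with
    | [] => simp [pvRewriteOps]
    | c :: u' =>
      have hc : ¬(c = '"' ∨ c = '\'') := hu c (by simp)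
      simp only [List.length_cons] at hlen
      rw [List.cons_append, pvLoopA]
      have h1 : ¬ ((none : Option Char) = none ∧ (c = '"' ∨ c = '\'')) := by simp [hc]
      have h2 : ¬ (some c = (none : Option Char)) := by simp
      rw [if_neg h1, if_neg h2, if_pos rfl]
      rw [pvRewriteOps]
      have hpand : ∀ x ∈ [' ', 'a', 'n', 'd', ' '], ¬(x = '"' ∨ x = '\'') := by
        intro x hx
        simp only [List.mem_cons, List.not_mem_nil, or_false] at hx
        rcases hx with rfl | rfl | rfl | rfl | rfl <;> simp
      have hpor : ∀ x ∈ [' ', 'o', 'r', ' '], ¬(x = '"' ∨ x = '\'') := by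
        intro x hx
        simp only [List.mem_cons, List.not_mem_nil, or_false] at hx
        rcases hx with rfl | rfl | rfl | rfl <;> simp
      have e5 := take_pat_append (c :: u') d [' ', 'a', 'n', 'd', ' '] hd hpand
      have e4 := take_pat_append (c :: u') d [' ', 'o', 'r', ' '] hd hpor
      have l5 : ([' ', 'a', 'n', 'd', ' '] : List Char).length = 5 := rfl
      have l4 : ([' ', 'o', 'r', ' '] : List Char).length = 4 := rfl
      rw [l5] at e5
      rw [l4] at e4
      rw [← List.cons_append]
      by_cases h5 : (c :: u').take 5 = [' ', 'a', 'n', 'd', ' ']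
      · rw [if_pos (e5.mpr h5), if_pos h5]
        have hl5 : 5 ≤ (c :: u').length := by
          have := congrArg List.length h5
          simp at this
          simp only [List.length_cons]
          omega
        rw [List.drop_append_of_le_length hl5]
        rw [ih _ d (by simp only [List.length_drop, List.length_cons]; omega) (fun x hx => hu x (List.mem_of_mem_drop hx)) hd]
        simp
      · rw [if_neg (fun hh => h5 (e5.mp hh)), if_neg h5]
        by_cases h4 : (c :: u').take 4 = [' ', 'o', 'r', ' ']
        · rw [if_pos (e4.mpr h4), if_pos h4]
          have hl4 : 4 ≤ (c :: u').length := by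
            have := congrArg List.length h4
            simp at this
            simp only [List.length_cons]
            omega
          rw [List.drop_append_of_le_length hl4]
          rw [ih _ d (by simp only [List.length_drop, List.length_cons]; omega) (fun x hx => hu x (List.mem_of_mem_drop hx)) hd]
          simp
        · rw [if_neg (fun hh => h4 (e4.mp hh)), if_neg h4]
          rw [List.cons_append,
            ih u' d (by omega) (fun x hx => hu x (by simp [hx])) hd]

-- Inside a quote, A copies characters until the closing quote (or the end), then resumes.
lemma pvLoopA_quote (q : Char) (rest : List Char) :
    pvLoopA rest (some q) =
      rest.takeWhile (· != q) ++
        (match rest.dropWhile (· != q) with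
         | [] => []
         | c :: r => c :: pvLoopA r none) := by
  induction rest with
  | nil => simp [pvLoopA]
  | cons ch tl ih =>
    by_cases hc : ch = q
    · subst hc
      simp [pvLoopA]
    · rw [pvLoopA]
      have h2 : ¬ (some ch = some q) := by simpa using hc
      simp only [List.takeWhile_cons, List.dropWhile_cons]
      simp [hc, h2, ih]

lemma head_dropWhile_false {α : Type} (p : α → Bool) :
    ∀ (l : List α) {c : α} {r : List α}, l.dropWhile p = c :: r → p c = false := by
  intro l
  induction l with
  | nil => intro c r h; simp at h
  | cons a t ih =>
    intro c r h
    rw [List.dropWhile_cons] at h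
    by_cases hpa : p a = true
    · rw [if_pos hpa] at h
      exact ih h
    · rw [if_neg hpa] at h
      injection h with h1 h2
      subst h1
      simpa using hpa

-- unfolding equations for the segmenter, one per shape of the two dropWhile results
lemma pvSegs_case_nil (rest : List Char)
    (h : rest.dropWhile (fun c => !(c == '"' || c == '\'')) = []) :
    pvSegs rest = [(false, rest.takeWhile (fun c => !(c == '"' || c == '\'')))] := by
  rw [pvSegs]
  split
  · rfl
  · rename_i q tl heq
    rw [h] at heq
    cases heq

lemma pvSegs_case_unterm (rest : List Char) (q : Char) (tl : List Char)
    (h : rest.dropWhile (fun c => !(c == '"' || c == '\'')) = q :: tl)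
    (h2 : tl.dropWhile (· != q) = []) :
    pvSegs rest =
      [(false, rest.takeWhile (fun c => !(c == '"' || c == '\''))), (true, q :: tl)] := by
  rw [pvSegs]
  split
  · rename_i heq
    rw [h] at heq
    cases heq
  · rename_i q' tl' heq
    rw [h] at heq
    injection heq with e1 e2
    subst e1
    subst e2
    split
    · rfl
    · rename_i c r heq2
      rw [h2] at heq2
      cases heq2

lemma pvSegs_case_closed (rest : List Char) (q c : Char) (tl r : List Char)
    (h : rest.dropWhile (fun c => !(c == '"' || c == '\'')) = q :: tl)
    (h2 : tl.dropWhile (· != q) = c :: r) :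
    pvSegs rest =
      (false, rest.takeWhile (fun c => !(c == '"' || c == '\''))) ::
      (true, q :: (tl.takeWhile (· != q) ++ [c])) :: pvSegs r := by
  rw [pvSegs]
  split
  · rename_i heq
    rw [h] at heq
    cases heq
  · rename_i q' tl' heq
    rw [h] at heq
    injection heq with e1 e2
    subst e1
    subst e2
    split
    · rename_i heq2
      rw [h2] at heq2
      cases heq2
    · rename_i c' r' heq2
      rw [h2] at heq2
      injection heq2 with e3 e4
      subst e3
      subst e4
      rfl

lemma pvLoopA_eq_segs : ∀ (n : ℕ) (rest : List Char), rest.length ≤ n →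
    pvLoopA rest none = (pvSegs rest).flatMap (fun s => if s.1 then s.2 else pvRewriteOps s.2) := by
  intro n
  induction n with
  | zero =>
    intro rest h
    have : rest = [] := by cases rest <;> simp_all
    subst this
    rw [pvSegs_case_nil [] (by simp)]
    simp [pvLoopA, pvRewriteOps]
  | succ m ih =>
    intro rest hlen
    have hsplit := List.takeWhile_append_dropWhile
      (p := fun c => !(c == '"' || c == '\'')) (l := rest)
    have hu : ∀ c ∈ rest.takeWhile (fun c => !(c == '"' || c == '\'')),
        ¬(c = '"' ∨ c = '\'') := by
      intro c hc
      have := List.mem_takeWhile_imp hc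
      simpa using this
    cases hdw : rest.dropWhile (fun c => !(c == '"' || c == '\'')) with
    | nil =>
      have hrest : rest = rest.takeWhile (fun c => !(c == '"' || c == '\'')) := by
        conv_lhs => rw [← hsplit]
        rw [hdw, List.append_nil]
      rw [pvSegs_case_nil rest hdw]
      simp only [List.flatMap_cons, List.flatMap_nil, List.append_nil,
        if_neg (by simp : ¬ (false = true))]
      conv_lhs => rw [hrest]
      have := pvLoopA_noquote (rest.takeWhile (fun c => !(c == '"' || c == '\''))).length
        (rest.takeWhile (fun c => !(c == '"' || c == '\''))) [] le_rfl hu (by simp)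
      simpa [pvLoopA] using this
    | cons q tl =>
      have hq : q = '"' ∨ q = '\'' := by
        have h' := head_dropWhile_false _ rest hdw
        simp at h'
        tauto
      have hrest : rest = rest.takeWhile (fun c => !(c == '"' || c == '\'')) ++ (q :: tl) := by
        conv_lhs => rw [← hsplit]
        rw [hdw]
      have hA : pvLoopA rest none =
          pvRewriteOps (rest.takeWhile (fun c => !(c == '"' || c == '\''))) ++
            pvLoopA (q :: tl) none := by
        conv_lhs => rw [hrest]
        exact pvLoopA_noquote _ _ _ le_rfl hu (by rintro q' tl' ⟨rfl, rfl⟩; exact hq)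
      have hA2 : pvLoopA (q :: tl) none = q :: pvLoopA tl (some q) := by
        rw [pvLoopA, if_pos ⟨rfl, hq⟩]
      have hdwlen := List.length_dropWhile_le (fun c => !(c == '"' || c == '\'')) rest
      rw [hdw] at hdwlen
      simp only [List.length_cons] at hdwlen
      cases h2 : tl.dropWhile (· != q) with
      | nil =>
        have htl : tl.takeWhile (· != q) = tl := by
          conv_rhs => rw [← List.takeWhile_append_dropWhile (p := (· != q)) (l := tl)]
          rw [h2, List.append_nil]
        rw [pvSegs_case_unterm rest q tl hdw h2]
        rw [hA, hA2, pvLoopA_quote, h2, htl]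
        simp
      | cons c r =>
        have hrlen := List.length_dropWhile_le (· != q) tl
        rw [h2] at hrlen
        simp only [List.length_cons] at hrlen
        rw [pvSegs_case_closed rest q c tl r hdw h2]
        rw [hA, hA2, pvLoopA_quote, h2]
        simp [ih r (by omega)]

-- ===== VERDICT (by name: the statement is the Claim_ definition above) =====
theorem normalize_logical_ops_py_spec : Claim_equal_normalize_logical_ops_py := by
  intro query _
  show normalize_logical_ops_py query = normalize_logical_ops_py_alt query
  unfold normalize_logical_ops_py normalize_logical_ops_py_alt
  rw [pvLoopA_eq_segs query.toList.length query.toList le_rfl]
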